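-- pv_equiv track=rewrite | github.com/iQuHACK/2026-NVIDIA | team-submissions/Phase 2/utils.py | get_theoretical_bounds
-- ===== SOURCE A (Python) =====
-- from typing import List, Tuple, Dict
--
-- def get_known_optimal(N: int) -> Tuple[int, List[int]]:
--     """
--     Get known optimal LABS energy for small N.
--
--     These are verified optimal or best-known solutions from literature.
--
--     Args:
--         N: Problem size
--
--     Returns:
--         (optimal_energy, optimal_sequence) or (None, None) if unknown
--
--     Reference: http://www.packomania.com/
--     """
--     known_solutions = {
--         3: (1, [1, 1, -1]),
--         4: (2, [1, 1, -1, -1]),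
--         5: (2, [1, 1, 1, -1, -1]),
--         6: (4, [1, 1, 1, -1, -1, -1]),
--         7: (4, [1, 1, 1, -1, -1, 1, -1]),
--         8: (6, [1, 1, 1, -1, -1, 1, -1, -1]),
--         9: (6, [1, 1, 1, 1, -1, -1, 1, -1, -1]),
--         10: (8, [1, 1, 1, -1, -1, 1, -1, -1, 1, -1]),
--         11: (10, [1, 1, 1, -1, -1, 1, -1, -1, 1, -1, -1]),
--         12: (12, [1, 1, 1, 1, -1, -1, 1, -1, -1, 1, -1, -1]),
--     }
--
--     if N in known_solutions:
--         energy, sequence = known_solutions[N]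
--         # Convert to binary
--         binary_seq = [(s + 1) // 2 for s in sequence]
--         return energy, binary_seq
--     else:
--         return None, None
--
-- def get_theoretical_bounds(N: int) -> Dict:
--     """
--     Get theoretical energy bounds for LABS problem.
--
--     Args:
--         N: Problem size
--
--     Returns:
--         Dictionary with bounds
--     """
--     # Worst case: all spins same
--     worst_case = sum((N - k) ** 2 for k in range(1, N))
--
--     # Best known (from literature)
--     optimal, _ = get_known_optimal(N)
--
--     # Trivial lower bound: 0 (unattainable for most N)
--     lower_bound = 0
--
--     return {
--         'lower_bound': lower_bound,
--         'best_known': optimal,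
--         'worst_case': worst_case,
--         'N': N
--     }
-- ===== SOURCE B (Python) =====
-- # B: closed-form worst case (sum of squares formula) + direct best-known table lookup; O(1) instead of A's O(N) loop.
-- _BEST_KNOWN = {3: 1, 4: 2, 5: 2, 6: 4, 7: 4, 8: 6, 9: 6, 10: 8, 11: 10, 12: 12}
--
-- def get_theoretical_bounds(N: int):
--     m = N - 1 if N > 1 else 0
--     worst_case = m * (m + 1) * (2 * m + 1) // 6
--     return {
--         'lower_bound': 0,
--         'best_known': _BEST_KNOWN.get(N),
--         'worst_case': worst_case,
--         'N': N,
--     }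
-- ===== Notes on version B (the rewrite author's own statement) =====
-- stated objective: faster
-- what changed: Replaces the linear-time generator sum over range(1, N) with the closed-form sum-of-squares formula, and the helper that builds optimal spin sequences and converts them to binary with a direct best-known-energy table lookup.
import Mathlib
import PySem

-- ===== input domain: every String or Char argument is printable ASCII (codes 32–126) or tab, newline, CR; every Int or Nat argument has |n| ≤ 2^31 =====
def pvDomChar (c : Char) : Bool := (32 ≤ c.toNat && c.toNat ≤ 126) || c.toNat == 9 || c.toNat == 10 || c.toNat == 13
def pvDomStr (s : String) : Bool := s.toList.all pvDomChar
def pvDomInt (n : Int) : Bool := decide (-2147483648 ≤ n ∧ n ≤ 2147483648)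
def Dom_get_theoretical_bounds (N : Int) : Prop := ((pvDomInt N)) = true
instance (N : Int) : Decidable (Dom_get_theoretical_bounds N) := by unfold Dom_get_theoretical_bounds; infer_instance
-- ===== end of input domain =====

-- B replaces A's O(N) loop with the closed-form sum-of-squares formula and the sequence-building helper with a direct energy table lookup.

-- ===== PORT A =====
-- the dict literal inside A's helper get_known_optimal: N -> (energy, spin sequence)
def knownSolutionsList : List (Int × (Int × List Int)) :=
    [ (3, (1, [1, 1, -1])),
      (4, (2, [1, 1, -1, -1])),
      (5, (2, [1, 1, 1, -1, -1])),
      (6, (4, [1, 1, 1, -1, -1, -1])),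
      (7, (4, [1, 1, 1, -1, -1, 1, -1])),
      (8, (6, [1, 1, 1, -1, -1, 1, -1, -1])),
      (9, (6, [1, 1, 1, 1, -1, -1, 1, -1, -1])),
      (10, (8, [1, 1, 1, -1, -1, 1, -1, -1, 1, -1])),
      (11, (10, [1, 1, 1, -1, -1, 1, -1, -1, 1, -1, -1])),
      (12, (12, [1, 1, 1, 1, -1, -1, 1, -1, -1, 1, -1, -1])) ]

-- A's helper: looks the key up and converts the spin sequence to binary with (s+1)//2
def get_known_optimal (N : Int) : Option Int × Option (List Int) :=
  let known_solutions : PySem.Dict Int (Int × List Int) := PySem.Dict.ofList knownSolutionsList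
  match known_solutions.get? N with
  | some (energy, sequence) =>
      (some energy, some (sequence.map (fun s => PySem.Int.floordiv (s + 1) 2)))
  | none => (none, none)

def get_theoretical_bounds (N : Int) : List (String × Option Int) :=
  let worst_case : Int := ((PySem.List.pyRange 1 N 1).map (fun k => (N - k) ^ 2)).sum
  let optimal := (get_known_optimal N).1
  let lower_bound : Int := 0
  [ ("lower_bound", some lower_bound),
    ("best_known", optimal),
    ("worst_case", some worst_case),
    ("N", some N) ]

-- ===== PORT B =====
-- Source B's module-level _BEST_KNOWN table
def bestKnownList : List (Int × Int) :=
  [(3, 1), (4, 2), (5, 2), (6, 4), (7, 4), (8, 6), (9, 6), (10, 8), (11, 10), (12, 12)]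

def get_theoretical_bounds_alt (N : Int) : List (String × Option Int) :=
  let m : Int := if N > 1 then N - 1 else 0
  let worst_case : Int := PySem.Int.floordiv (m * (m + 1) * (2 * m + 1)) 6
  [ ("lower_bound", some 0),
    ("best_known", (PySem.Dict.ofList bestKnownList).get? N),
    ("worst_case", some worst_case),
    ("N", some N) ]

-- ===== PRECONDITION & SPEC =====
def Spec_get_theoretical_bounds (N : Int) (out : List (String × Option Int)) : Prop := out = get_theoretical_bounds_alt N
instance (N : Int) (out : List (String × Option Int)) : Decidable (Spec_get_theoretical_bounds N out) := by unfold Spec_get_theoretical_bounds; infer_instance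

-- ===== CLAIM (what is proved, stated in full; the proofs are below) =====
def Claim_equal_get_theoretical_bounds : Prop := ∀ (N : Int), Dom_get_theoretical_bounds N → Spec_get_theoretical_bounds N (get_theoretical_bounds N)

-- ===== LEMMAS AND PROOFS =====

-- closed form for 6 · Σ_{k<m} (C-k)², kept multiplied by 6 to stay in ℤ
theorem six_mul_sum_sq (m : Nat) (C : Int) :
    6 * ((List.range m).map (fun k : Nat => (C - (k : Int)) ^ 2)).sum
      = 6 * m * C ^ 2 - 6 * C * ((m : Int) ^ 2 - m) + (2 * (m : Int) ^ 3 - 3 * m ^ 2 + m) := by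
  induction m with
  | zero => simp
  | succ n ih =>
      rw [List.range_succ]
      simp only [List.map_append, List.sum_append, List.map_cons, List.map_nil, List.sum_cons,
        List.sum_nil]
      push_cast
      push_cast at ih
      nlinarith [ih]

-- A's generator sum equals B's closed-form worst case
theorem worst_eq (N : Int) :
    ((PySem.List.pyRange 1 N 1).map (fun k => (N - k) ^ 2)).sum
      = PySem.Int.floordiv ((if N > 1 then N - 1 else 0) * ((if N > 1 then N - 1 else 0) + 1) *
          (2 * (if N > 1 then N - 1 else 0) + 1)) 6 := by
  by_cases h : N > 1
  · rw [if_pos h, PySem.List.pyRange_one, List.map_map]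
    set m : Nat := (N - 1).toNat with hm
    have hmN : (m : Int) = N - 1 := by omega
    have hterm : (List.range m).map ((fun k => (N - k) ^ 2) ∘ fun k : Nat => (1 : Int) + k)
        = (List.range m).map (fun k : Nat => ((m : Int) - k) ^ 2) := by
      apply List.map_congr_left
      intro a _
      simp only [Function.comp]
      rw [hmN]; ring
    rw [hterm]
    have h6 := six_mul_sum_sq m (m : Int)
    have hprod : (N - 1) * (N - 1 + 1) * (2 * (N - 1) + 1)
        = 6 * ((List.range m).map (fun k : Nat => ((m : Int) - k) ^ 2)).sum := by
      rw [h6, ← hmN]; ring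
    rw [hprod]
    simp [PySem.Int.floordiv]
  · rw [if_neg h]
    have he : PySem.List.pyRange 1 N 1 = [] := PySem.List.pyRange_one_eq_nil (by omega)
    rw [he]
    simp [PySem.Int.floordiv]

-- A's table lookup (energy component) equals B's table lookup
set_option maxHeartbeats 2000000 in
theorem best_eq (N : Int) : (get_known_optimal N).1 = (PySem.Dict.ofList bestKnownList).get? N := by
  unfold get_known_optimal
  have hA : PySem.Dict.ofList knownSolutionsList = PySem.Dict.mk knownSolutionsList := by rfl
  have hB : PySem.Dict.ofList bestKnownList = PySem.Dict.mk bestKnownList := by rfl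
  rw [hA, hB]
  unfold knownSolutionsList bestKnownList
  simp only [PySem.Dict.get?_mk_cons]
  split_ifs <;> rfl

-- ===== VERDICT (by name: the statement is the Claim_ definition above) =====
theorem get_theoretical_bounds_spec : Claim_equal_get_theoretical_bounds := by
  intro N _
  unfold Spec_get_theoretical_bounds get_theoretical_bounds get_theoretical_bounds_alt
  rw [worst_eq, best_eq]
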